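-- pv_equiv track=rewrite | github.com/MrBrantCode/unitest_baseline | mut_generate/mist_train_cf/cf_9116/solution.py | group_and_sort
-- ===== SOURCE A (Python) =====
-- def group_and_sort(dicts):
--     """
--     Groups a list of dictionaries by a shared key ('score'),
--     then sorts the groups in descending order based on the sum of the shared key ('score').
--     If two groups have the same sum, then sort them based on the minimum value of another key ('age').
--
--     Args:
--         dicts (list): A list of dictionaries.
--
--     Returns:
--         list: A list of lists of dictionaries.
--     """
--
--     # Group the list by the shared key 'score'
--     grouped_list = {}
--     for dictionary in dicts:
--         score = dictionary['score']
--         if score in grouped_list: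
--             grouped_list[score].append(dictionary)
--         else:
--             grouped_list[score] = [dictionary]
--
--     # Sort the groups in descending order based on the sum of the shared key 'score'
--     sorted_groups = sorted(grouped_list.values(), key=lambda x: (sum(dictionary['score'] for dictionary in x), -min(dictionary['age'] for dictionary in x)), reverse=True)
--
--     return sorted_groups
-- ===== SOURCE B (Python) =====
-- def group_and_sort(dicts):
--     # Partition pass: repeatedly peel off the group of the first remaining score
--     # (keeps first-occurrence group order and original order inside each group).
--     groups = []
--     rest = dicts
--     while rest:
--         s = rest[0]['score']
--         groups.append([d for d in rest if d['score'] == s])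
--         rest = [d for d in rest if d['score'] != s]
--     # Ascending stable sort on the negated key == A's reverse=True descending sort.
--     return sorted(groups, key=lambda g: (-sum(d['score'] for d in g),
--                                          min(d['age'] for d in g)))
-- ===== Notes on version B (the rewrite author's own statement) =====
-- stated objective: alternative
-- what changed: Replaces A's hash-table accumulation by a partition loop that repeatedly peels off the group of the first remaining score, and replaces the reverse=True descending sort by a stable ascending sort on the negated key.
import Mathlib
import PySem

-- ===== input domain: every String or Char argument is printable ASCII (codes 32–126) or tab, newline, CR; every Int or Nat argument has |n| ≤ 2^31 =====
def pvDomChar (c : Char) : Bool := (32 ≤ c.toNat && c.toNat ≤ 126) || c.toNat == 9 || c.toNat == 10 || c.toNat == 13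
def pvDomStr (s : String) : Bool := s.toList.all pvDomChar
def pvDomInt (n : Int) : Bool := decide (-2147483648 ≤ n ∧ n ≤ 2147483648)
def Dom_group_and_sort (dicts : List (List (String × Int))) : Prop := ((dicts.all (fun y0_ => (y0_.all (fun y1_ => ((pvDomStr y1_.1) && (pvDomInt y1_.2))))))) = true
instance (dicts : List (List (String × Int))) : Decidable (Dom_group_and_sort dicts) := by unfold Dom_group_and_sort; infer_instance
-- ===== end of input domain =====

-- B partitions the list score by score (peel off the first remaining score's group) instead of A's
-- hash-accumulation loop, and sorts ascending on the negated key instead of reverse=True; same value.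

-- ===== PORT A =====
-- d['score'] / d['age'] on the association list: first match; .getD 0 is unreachable under Pre_ (every dict has both keys)
def pvScore (d : List (String × Int)) : Int := (((d.find? (fun kv => kv.1 == "score")).map (·.2)).getD 0)
def pvAge (d : List (String × Int)) : Int := (((d.find? (fun kv => kv.1 == "age")).map (·.2)).getD 0)
-- sum(dictionary['score'] for dictionary in x)
def pvSumScore (g : List (List (String × Int))) : Int := g.foldl (fun a d => a + pvScore d) 0
-- -min(dictionary['age'] for dictionary in x); min of a nonempty iterable (.getD 0 unreachable: groups are nonempty)
def pvNegMinAge (g : List (List (String × Int))) : Int := -((PySem.List.min? (g.map pvAge) (fun x => x)).getD 0)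

def group_and_sort (dicts : List (List (String × Int))) : List (List (List (String × Int))) :=
  let grouped : PySem.Dict Int (List (List (String × Int))) :=
    dicts.foldl (fun g d =>
      let s := pvScore d
      if g.contains s then g.modify s [] (fun l => l ++ [d]) else g.insert s [d])
      PySem.Dict.empty
  PySem.List.sorted2 grouped.values pvSumScore pvNegMinAge true

-- ===== PORT B =====
-- d['score'] / d['age'] as B writes them (first match on the association list)
def pvScoreB (d : List (String × Int)) : Int := ((d.find? (fun kv => kv.1 == "score")).getD ("", 0)).2
def pvAgeB (d : List (String × Int)) : Int := ((d.find? (fun kv => kv.1 == "age")).getD ("", 0)).2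

-- the while loop: peel off the group of the first remaining score, recurse on the rest
def pvPeel (rest : List (List (String × Int))) : List (List (List (String × Int))) :=
  match rest with
  | [] => []
  | d :: tl =>
    (rest.filter (fun x => pvScoreB x == pvScoreB d)) ::
      pvPeel (tl.filter (fun x => !(pvScoreB x == pvScoreB d)))
termination_by rest.length
decreasing_by simp; exact le_trans (List.length_filter_le _ _) (by simp)

def group_and_sort_alt (dicts : List (List (String × Int))) : List (List (List (String × Int))) :=
  PySem.List.sorted2 (pvPeel dicts)
    (fun g => -((g.map pvScoreB).sum))
    (fun g => (PySem.List.min? (g.map pvAgeB) (fun x => x)).getD 0)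
    false

-- ===== PRECONDITION & SPEC =====
-- Pre_ excludes exactly the inputs where A raises KeyError: some dict lacks the 'score' or the 'age' key.
def Pre_group_and_sort (dicts : List (List (String × Int))) : Prop :=
  ∀ d ∈ dicts, (∃ kv ∈ d, kv.1 = "score") ∧ (∃ kv ∈ d, kv.1 = "age")
instance (dicts : List (List (String × Int))) : Decidable (Pre_group_and_sort dicts) := by unfold Pre_group_and_sort; infer_instance
def pvWitness_group_and_sort : (List (List (String × Int))) :=
  [[("score", 1), ("age", 7)], [("score", 2), ("age", 3)], [("score", 1), ("age", 5)]]
def Spec_group_and_sort (dicts : List (List (String × Int))) (out : List (List (List (String × Int)))) : Prop := out = group_and_sort_alt dicts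
instance (dicts : List (List (String × Int))) (out : List (List (List (String × Int)))) : Decidable (Spec_group_and_sort dicts out) := by unfold Spec_group_and_sort; infer_instance

-- ===== CLAIM (what is proved, stated in full; the proofs are below) =====
def Claim_equal_group_and_sort : Prop := ∀ (dicts : List (List (String × Int))), Dom_group_and_sort dicts → Pre_group_and_sort dicts → Spec_group_and_sort dicts (group_and_sort dicts)

-- ===== LEMMAS AND PROOFS =====

-- B's lookups compute the same Int as A's
theorem pvScoreB_eq : pvScoreB = pvScore := by
  funext d
  cases h : d.find? (fun kv => kv.1 == "score") <;> simp [pvScoreB, pvScore, h]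

theorem pvAgeB_eq : pvAgeB = pvAge := by
  funext d
  cases h : d.find? (fun kv => kv.1 == "age") <;> simp [pvAgeB, pvAge, h]

-- A's loop body is a single Dict.modify (append-to-bucket), whether or not the key is present
theorem pv_step_eq (g : PySem.Dict Int (List (List (String × Int)))) (d : List (String × Int)) :
    (if g.contains (pvScore d) then g.modify (pvScore d) [] (fun l => l ++ [d])
     else g.insert (pvScore d) [d]) = g.modify (pvScore d) [] (fun l => l ++ [d]) := by
  by_cases hc : g.contains (pvScore d) = true
  · simp [hc]
  · simp only [Bool.not_eq_true] at hc
    simp [hc, PySem.Dict.modify, PySem.Dict.getD_of_not_contains]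

-- the grouping dict's values are: one filter of dicts per first-occurrence-ordered distinct score
theorem pv_values_eq (dicts : List (List (String × Int))) :
    (dicts.foldl (fun g d =>
        let s := pvScore d
        if g.contains s then g.modify s [] (fun l => l ++ [d]) else g.insert s [d])
      (PySem.Dict.empty : PySem.Dict Int (List (List (String × Int))))).values
    = (PySem.List.dedup (dicts.map pvScore)).map (fun s => dicts.filter (fun d => pvScore d == s)) := by
  have hf : (fun (g : PySem.Dict Int (List (List (String × Int)))) d =>
        let s := pvScore d
        if g.contains s then g.modify s [] (fun l => l ++ [d]) else g.insert s [d])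
      = (fun g d => g.modify (pvScore d) [] (fun l => l ++ [d])) := by
    funext g d; exact pv_step_eq g d
  rw [hf]
  have hnd : (dicts.foldl (fun g d => g.modify (pvScore d) [] (fun l => l ++ [d]))
      (PySem.Dict.empty : PySem.Dict Int (List (List (String × Int))))).keys.Nodup :=
    PySem.Dict.nodup_keys_foldl_modify_key dicts pvScore [] (fun _ x l => l ++ [x]) _
      PySem.Dict.nodup_keys_empty
  rw [PySem.Dict.values_eq_map_keys _ hnd []]
  have hk : (dicts.foldl (fun g d => g.modify (pvScore d) [] (fun l => l ++ [d]))
      (PySem.Dict.empty : PySem.Dict Int (List (List (String × Int))))).keys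
      = PySem.List.dedup (dicts.map pvScore) := by
    rw [PySem.Dict.keys_foldl_modify_key dicts pvScore [] (fun _ x l => l ++ [x]) _]
    simp [PySem.Dict.keys_empty, PySem.Set.update_nil_left]
  rw [hk]
  refine List.map_congr_left (fun c _ => ?_)
  have hm : dicts.foldl (fun g d => g.modify (pvScore d) [] (fun l => l ++ [d]))
      (PySem.Dict.empty : PySem.Dict Int (List (List (String × Int))))
      = (dicts.map (fun d => (pvScore d, d))).foldl (fun g p => g.modify p.1 [] (fun l => l ++ [p.2]))
        PySem.Dict.empty := by
    rw [List.foldl_map]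
  rw [hm, PySem.Dict.getD_foldl_modify_append]
  simp [List.filter_map, Function.comp_def]

-- dedup of a cons: head first, then the dedup of the tail with the head's value removed
theorem pv_foldl_add_mem (x : Int) (l : List Int) :
    ∀ acc : List Int, x ∈ acc →
      l.foldl PySem.Set.add acc = (l.filter (fun y => !(y == x))).foldl PySem.Set.add acc := by
  induction l with
  | nil => intro acc _; rfl
  | cons y t ih =>
    intro acc hx
    by_cases hy : y = x
    · subst hy
      have hc : PySem.Set.add acc y = acc := by
        simp [PySem.Set.add, PySem.Set.contains, hx]
      simp only [List.filter_cons, beq_self_eq_true, Bool.not_true, List.foldl_cons, hc]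
      exact ih acc hx
    · have hmem : x ∈ PySem.Set.add acc y := by
        simp only [PySem.Set.add]; split <;> simp [hx]
      have hfy : ((y : Int) == x) = false := by simp [hy]
      simp only [List.filter_cons, hfy, Bool.not_false, List.foldl_cons]
      exact ih _ hmem

theorem pv_foldl_add_cons (x : Int) (m : List Int) (hm : ∀ y ∈ m, y ≠ x) :
    ∀ acc : List Int, m.foldl PySem.Set.add (x :: acc) = x :: m.foldl PySem.Set.add acc := by
  induction m with
  | nil => intro acc; rfl
  | cons y t ih =>
    intro acc
    have hy : y ≠ x := hm y (by simp)
    have hcons : PySem.Set.add (x :: acc) y = x :: PySem.Set.add acc y := by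
      by_cases hmc : y ∈ acc <;>
        simp [PySem.Set.add, PySem.Set.contains, hmc, hy]
    simp only [List.foldl_cons, hcons]
    exact ih (fun z hz => hm z (by simp [hz])) _

theorem pv_dedup_cons (x : Int) (l : List Int) :
    PySem.List.dedup (x :: l) = x :: PySem.List.dedup (l.filter (fun y => !(y == x))) := by
  have h0 : PySem.Set.add ([] : List Int) x = [x] := rfl
  rw [PySem.List.dedup_eq_ofList, PySem.List.dedup_eq_ofList,
      PySem.Set.ofList_eq_foldl, PySem.Set.ofList_eq_foldl]
  simp only [List.foldl_cons, h0]
  rw [pv_foldl_add_mem x l [x] (by simp)]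
  exact pv_foldl_add_cons x _ (fun y hy => by
    have := List.of_mem_filter hy; simpa using this) []

-- the peeling loop produces exactly one filter of the whole list per first-occurrence-ordered distinct score
theorem pv_peel_eq (n : Nat) : ∀ L : List (List (String × Int)), L.length ≤ n →
    pvPeel L = (PySem.List.dedup (L.map pvScore)).map (fun s => L.filter (fun d => pvScore d == s)) := by
  induction n with
  | zero =>
    intro L hL
    have : L = [] := List.length_eq_zero_iff.mp (Nat.le_zero.mp hL)
    subst this; simp [pvPeel]
  | succ n ih =>
    intro L hL
    cases L with
    | nil => simp [pvPeel]
    | cons d tl =>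
      rw [pvPeel.eq_def]
      simp only [pvScoreB_eq]
      have htail : (tl.filter (fun x => !(pvScore x == pvScore d))).length ≤ n :=
        le_trans (List.length_filter_le _ _) (Nat.le_of_succ_le_succ hL)
      rw [ih _ htail, List.map_cons, pv_dedup_cons, List.map_cons]
      congr 1
      have hmapf : (tl.filter (fun x => !(pvScore x == pvScore d))).map pvScore
          = (tl.map pvScore).filter (fun y => !(y == pvScore d)) := by
        rw [List.filter_map]; rfl
      rw [hmapf]
      refine List.map_congr_left (fun c hc => ?_)
      have hcne : ¬(c = pvScore d) := by
        have hc' := (PySem.List.mem_dedup _ _).mp hc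
        have := List.of_mem_filter hc'
        simpa using this
      rw [List.filter_filter, List.filter_cons]
      have hhead' : (pvScore d == c) = false := by
        simp
        exact fun h => hcne (Eq.symm h)
      rw [if_neg (by simp [hhead'])]
      refine (List.filter_congr (fun x _ => ?_)).symm
      by_cases hx : pvScore x = c
      · have : (pvScore x == pvScore d) = false := by
          simp [hx]
          exact hcne
        simp [hx]
        exact hcne
      · simp [hx]

-- descending (reverse=True) sort2 = ascending sort2 on the negated keys (same insertion predicate)
theorem pv_sorted2_rev_neg {α : Type} (xs : List α) (k1 k2 : α → Int) :
    PySem.List.sorted2 xs k1 k2 true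
      = PySem.List.sorted2 xs (fun x => -(k1 x)) (fun x => -(k2 x)) false := by
  simp only [PySem.List.sorted2, if_neg (by simp : ¬ (false = true))]
  congr 1
  funext acc x
  congr 1
  funext a b
  simp [neg_lt_neg_iff]

-- ===== VERDICT (by name: the statement is the Claim_ definition above) =====
theorem group_and_sort_spec : Claim_equal_group_and_sort := by
  intro dicts _ _
  show group_and_sort dicts = group_and_sort_alt dicts
  have h1 : group_and_sort dicts
      = PySem.List.sorted2 ((PySem.List.dedup (dicts.map pvScore)).map
          (fun s => dicts.filter (fun d => pvScore d == s))) pvSumScore pvNegMinAge true :=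
    congrArg (fun v => PySem.List.sorted2 v pvSumScore pvNegMinAge true) (pv_values_eq dicts)
  rw [h1, ← pv_peel_eq dicts.length dicts (Nat.le_refl _), pv_sorted2_rev_neg]
  unfold group_and_sort_alt
  simp only [pvScoreB_eq, pvAgeB_eq]
  congr 1
  · funext g
    have := PySem.List.foldl_add (l := g) (g := pvScore) (a := (0:Int))
    simp [pvSumScore, this]
  · funext g
    simp [pvNegMinAge]
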